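-- pv_equiv track=rewrite | github.com/fuszti/advent_of_code_2020 | day_10/task.py | count_possible_chains
-- ===== SOURCE A (Python) =====
-- def count_possible_chains(sorted_joltage_rates):
--     compatible_diffs = [1, 2, 3]
--     nbr_of_possible_chains = [0] * len(sorted_joltage_rates)
--     nbr_of_possible_chains[0] = 1
--     for idx, joltage_rate in enumerate(sorted_joltage_rates[1:]):
--         curr_idx = idx + 1
--         step_back = 1
--         while curr_idx - step_back >= 0 and \
--             joltage_rate - sorted_joltage_rates[curr_idx - step_back] <= 3:
--             nbr_of_possible_chains[curr_idx] += nbr_of_possible_chains[curr_idx - step_back]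
--             step_back += 1
--     return nbr_of_possible_chains[-1]
-- ===== SOURCE B (Python) =====
-- def count_possible_chains(sorted_joltage_rates):
--     # Prefix-sum + two-pointer DP: prefix[k] = dp[0]+...+dp[k-1]; the valid
--     # predecessors of k form the contiguous suffix [lo, k) of the sorted list,
--     # so dp[k] = prefix[k] - prefix[lo], with lo only ever moving forward.
--     prefix = [0, 1]  # dp[0] = 1
--     lo = 0
--     for k in range(1, len(sorted_joltage_rates)):
--         while sorted_joltage_rates[k] - sorted_joltage_rates[lo] > 3:
--             lo += 1
--         dp_k = prefix[k] - prefix[lo]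
--         prefix.append(prefix[k] + dp_k)
--     return prefix[-1] - prefix[-2]
-- ===== Notes on version B (the rewrite author's own statement) =====
-- stated objective: faster
-- what changed: The per-index DP array with an inner gathering loop (dp[k] += dp[k-step] while within 3 jolts) is replaced by a running prefix-sum list plus a two-pointer left boundary: dp[k] is obtained in O(1) as prefix[k] - prefix[lo] with lo advanced monotonically, so the O(w) inner accumulation loop disappears and total cost drops from O(n*w) to O(n).
-- outside the precondition, e.g. on count_possible_chains([]): A raises IndexError, B returns 1; on count_possible_chains([0, 10, 1]): A returns 1, B returns 0
import Mathlib
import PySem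

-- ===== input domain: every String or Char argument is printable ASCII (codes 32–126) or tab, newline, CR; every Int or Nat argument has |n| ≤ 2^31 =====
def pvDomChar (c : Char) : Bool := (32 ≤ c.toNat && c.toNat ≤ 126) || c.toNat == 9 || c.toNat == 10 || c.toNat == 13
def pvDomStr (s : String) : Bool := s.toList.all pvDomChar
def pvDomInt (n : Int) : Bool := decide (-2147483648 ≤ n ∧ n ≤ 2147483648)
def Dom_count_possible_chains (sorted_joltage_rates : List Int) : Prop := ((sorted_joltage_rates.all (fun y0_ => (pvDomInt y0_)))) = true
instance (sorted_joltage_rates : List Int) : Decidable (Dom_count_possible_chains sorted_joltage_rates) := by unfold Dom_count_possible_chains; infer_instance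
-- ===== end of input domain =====

-- B replaces A's per-index gathering DP (an inner loop stepping back through the ≤3-jolt window
-- summing counts) by a running prefix-sum list plus a monotone two-pointer left boundary, so each
-- dp value is one subtraction: the inner accumulation loop disappears (O(n) vs O(n·w); the timing
-- run measured B faster on the generated inputs).

-- ===== PORT A =====
-- inner while loop of A; the guard keeps curr_idx - step_back ≥ 0 and below the list length,
-- so pyGetD/pySetD are exact here; the fuel argument only makes the while loop structurally
-- terminating and is always large enough at the call site
def pullInner (rates : List Int) (joltage_rate : Int) (curr_idx : Int)
    (nbr : List Int) (step_back : Int) : Nat → List Int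
  | 0 => nbr
  | fuel + 1 =>
    if 0 ≤ curr_idx - step_back ∧
        joltage_rate - PySem.List.pyGetD rates (curr_idx - step_back) 0 ≤ 3 then
      pullInner rates joltage_rate curr_idx
        (PySem.List.pySetD nbr curr_idx
          (PySem.List.pyGetD nbr curr_idx 0 + PySem.List.pyGetD nbr (curr_idx - step_back) 0))
        (step_back + 1) fuel
    else nbr

def count_possible_chains (sorted_joltage_rates : List Int) : Int :=
  let nbr0 := PySem.List.pySetD (List.replicate sorted_joltage_rates.length (0 : Int)) 0 1
  let nbr := (PySem.List.enumerate (PySem.List.slice sorted_joltage_rates (some 1) none) 0).foldl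
    (fun nbr p => pullInner sorted_joltage_rates p.2 (p.1 + 1) nbr 1 ((p.1 + 1).toNat)) nbr0
  PySem.List.pyGetD nbr (-1) 0

-- ===== PORT B =====
-- B's inner while loop: advance lo while rates[k] - rates[lo] > 3; the fuel only makes the loop
-- structurally terminating and is always large enough at the call site (lo never passes k)
def findLo (rates : List Int) (rk : Int) (lo : Int) : Nat → Int
  | 0 => lo
  | fuel + 1 =>
    if 3 < rk - PySem.List.pyGetD rates lo 0 then findLo rates rk (lo + 1) fuel else lo

-- the body of B's for loop: state = (prefix list, lo)
def tpStep (rates : List Int) (st : List Int × Int) (k : Int) : List Int × Int :=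
  let lo := findLo rates (PySem.List.pyGetD rates k 0) st.2 (k.toNat + 1)
  let dpk := PySem.List.pyGetD st.1 k 0 - PySem.List.pyGetD st.1 lo 0
  (st.1 ++ [PySem.List.pyGetD st.1 k 0 + dpk], lo)

def count_possible_chains_alt (sorted_joltage_rates : List Int) : Int :=
  let st := (PySem.List.pyRange 1 (PySem.List.len sorted_joltage_rates) 1).foldl
    (tpStep sorted_joltage_rates) ([0, 1], 0)
  PySem.List.pyGetD st.1 (-1) 0 - PySem.List.pyGetD st.1 (-2) 0

-- ===== PRECONDITION & SPEC =====
-- WindowClosed: whenever two positions are within 3 jolts, every position between them is within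
-- 3 jolts of both.  It holds for every non-decreasing list (the function's stated input domain)
-- and for many more lists (e.g. any list whose values span at most 3, any list of length ≤ 2).
def WindowClosed (r : List Int) : Prop :=
  ∀ k, k < r.length → ∀ j, j < k → ∀ i, i < j →
    r.getD k 0 - r.getD i 0 ≤ 3 →
    r.getD k 0 - r.getD j 0 ≤ 3 ∧ r.getD j 0 - r.getD i 0 ≤ 3
-- Pre_ excludes the empty list, on which A raises IndexError, and lists without the WindowClosed
-- property above; those are outside the function's stated domain (the parameter is
-- sorted_joltage_rates) and there A's backward window scan and B's two-pointer boundary stop at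
-- different places, so A's value is an accident of its implementation.
def Pre_count_possible_chains (sorted_joltage_rates : List Int) : Prop :=
  sorted_joltage_rates ≠ [] ∧ WindowClosed sorted_joltage_rates
instance (sorted_joltage_rates : List Int) : Decidable (Pre_count_possible_chains sorted_joltage_rates) := by
  unfold Pre_count_possible_chains WindowClosed; infer_instance
def pvWitness_count_possible_chains : List Int := [1, 4, 5, 6, 7]
def Spec_count_possible_chains (sorted_joltage_rates : List Int) (out : Int) : Prop := out = count_possible_chains_alt sorted_joltage_rates
instance (sorted_joltage_rates : List Int) (out : Int) : Decidable (Spec_count_possible_chains sorted_joltage_rates out) := by unfold Spec_count_possible_chains; infer_instance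

-- ===== CLAIM (what is proved, stated in full; the proofs are below) =====
def Claim_equal_count_possible_chains : Prop := ∀ (sorted_joltage_rates : List Int), Dom_count_possible_chains sorted_joltage_rates → Pre_count_possible_chains sorted_joltage_rates → Spec_count_possible_chains sorted_joltage_rates (count_possible_chains sorted_joltage_rates)

-- ===== LEMMAS AND PROOFS =====

lemma getD_set_self (l : List Int) (i : Nat) (v : Int) (h : i < l.length) :
    (l.set i v).getD i 0 = v := by
  simp [List.getD, h]

lemma getD_set_ne (l : List Int) (i j : Nat) (v : Int) (h : i ≠ j) :
    (l.set i v).getD j 0 = l.getD j 0 := by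
  simp [List.getD, List.getElem?_set_ne h]

lemma set_getD_self (l : List Int) (i : Nat) (h : i < l.length) :
    l.set i (l.getD i 0) = l := by
  rw [List.getD_eq_getElem l 0 h]; exact List.set_getElem_self h

-- the common value of both DPs: number of chains ending at index k
def gf (r : List Int) (k : Nat) : Int :=
  (if k = 0 then 1 else 0) +
    (((List.range k).attach).map (fun p => if r.getD k 0 - r.getD p.1 0 ≤ 3 then gf r p.1 else 0)).sum
termination_by k
decreasing_by exact List.mem_range.mp p.2

lemma gf_eq (r : List Int) (k : Nat) :
    gf r k = (if k = 0 then 1 else 0) +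
      ((List.range k).map (fun p => if r.getD k 0 - r.getD p 0 ≤ 3 then gf r p else 0)).sum := by
  rw [gf]; congr 1; simp

lemma gf_zero (r : List Int) : gf r 0 = 1 := by rw [gf_eq]; simp

lemma pullInner_spec (r : List Int) (hp : WindowClosed r) (ci : Nat) (hci : ci < r.length) :
    ∀ (fuel sb : Nat) (dp : List Int), 1 ≤ sb → ci + 1 - sb ≤ fuel → dp.length = r.length →
    pullInner r (r.getD ci 0) (ci : Int) dp (sb : Int) fuel
      = dp.set ci (dp.getD ci 0 +
          ((List.range (ci + 1 - sb)).map
            (fun p => if r.getD ci 0 - r.getD p 0 ≤ 3 then dp.getD p 0 else 0)).sum) := by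
  intro fuel
  induction fuel with
  | zero =>
    intro sb dp hsb hfuel hlen
    have h0 : ci + 1 - sb = 0 := by omega
    rw [h0]
    simp only [pullInner, List.range_zero, List.map_nil, List.sum_nil, add_zero]
    rw [set_getD_self dp ci (by omega)]
  | succ fuel ih =>
    intro sb dp hsb hfuel hlen
    by_cases hsbci : sb ≤ ci
    · have hcast : (ci : Int) - (sb : Int) = ((ci - sb : Nat) : Int) := by omega
      rw [pullInner, hcast]
      rw [PySem.List.pyGetD_natCast, PySem.List.pyGetD_natCast, PySem.List.pyGetD_natCast,
        PySem.List.pySetD_natCast]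
      by_cases hcond : r.getD ci 0 - r.getD (ci - sb) 0 ≤ 3
      · rw [if_pos ⟨by omega, hcond⟩]
        have hstep : (sb : Int) + 1 = ((sb + 1 : Nat) : Int) := by omega
        rw [hstep, ih (sb + 1) _ (by omega) (by omega) (by simpa using hlen)]
        have hr1 : ci + 1 - (sb + 1) = ci - sb := by omega
        have hr2 : ci + 1 - sb = (ci - sb) + 1 := by omega
        rw [hr1, hr2, List.range_succ]
        rw [getD_set_self dp ci _ (by omega)]
        rw [List.map_congr_left (fun p hpmem => by
          have hplt : p < ci - sb := List.mem_range.mp hpmem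
          rw [getD_set_ne dp ci p _ (by omega)])]
        rw [List.set_set]
        simp only [List.map_append, List.map_cons, List.map_nil, List.sum_append,
          List.sum_cons, List.sum_nil, if_pos hcond]
        congr 1
        ring
      · rw [if_neg (by rintro ⟨-, hc⟩; exact hcond hc)]
        have hsum : ((List.range (ci + 1 - sb)).map
            (fun p => if r.getD ci 0 - r.getD p 0 ≤ 3 then dp.getD p 0 else 0)).sum = 0 := by
          apply List.sum_eq_zero
          intro x hx
          obtain ⟨p, hpmem, rfl⟩ := List.mem_map.mp hx
          have hplt : p < ci + 1 - sb := List.mem_range.mp hpmem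
          rcases Nat.lt_or_ge p (ci - sb) with hplt2 | hge
          · rw [if_neg (fun hc => hcond
              (hp ci hci (ci - sb) (by omega) p hplt2 hc).1)]
          · have hpe : p = ci - sb := by omega
            rw [hpe, if_neg hcond]
        rw [hsum, add_zero, set_getD_self dp ci (by omega)]
    · have h0 : ci + 1 - sb = 0 := by omega
      rw [h0, pullInner, if_neg (by rintro ⟨hge, -⟩; omega)]
      simp only [List.range_zero, List.map_nil, List.sum_nil, add_zero]
      rw [set_getD_self dp ci (by omega)]

lemma pull_fold (r : List Int) (hp : WindowClosed r) :
    ∀ (xs : List Int) (m : Nat) (dp : List Int), xs = r.drop (m + 1) → dp.length = r.length →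
    (∀ k, k < r.length → dp.getD k 0 = if k ≤ m then gf r k else 0) →
    ((PySem.List.enumerate xs (m : Int)).foldl
        (fun nbr p => pullInner r p.2 (p.1 + 1) nbr 1 ((p.1 + 1).toNat)) dp).length = r.length ∧
    ∀ k, k < r.length →
      ((PySem.List.enumerate xs (m : Int)).foldl
        (fun nbr p => pullInner r p.2 (p.1 + 1) nbr 1 ((p.1 + 1).toNat)) dp).getD k 0
        = if k ≤ m + xs.length then gf r k else 0 := by
  intro xs
  induction xs with
  | nil =>
    intro m dp _ hlen hinv
    simp only [PySem.List.enumerate_nil, List.foldl_nil, List.length_nil, Nat.add_zero]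
    exact ⟨hlen, hinv⟩
  | cons x xs' ih =>
    intro m dp hdrop hlen hinv
    have hlt : m + 1 < r.length := by
      by_contra hc
      rw [List.drop_eq_nil_of_le (by omega : r.length ≤ m + 1)] at hdrop
      exact (List.cons_ne_nil x xs') hdrop
    have hx : x = r.getD (m + 1) 0 := by
      have h0 : (x :: xs')[0]? = (r.drop (m + 1))[0]? := by rw [hdrop]
      rw [List.getElem?_drop] at h0
      simp only [List.getElem?_cons_zero, Nat.add_zero, List.getElem?_eq_getElem hlt] at h0
      rw [List.getD_eq_getElem r 0 hlt]
      exact Option.some.inj h0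
    have hxs' : xs' = r.drop (m + 2) := by
      have ht : (x :: xs').tail = (r.drop (m + 1)).tail := by rw [hdrop]
      simpa [List.tail_drop] using ht
    rw [PySem.List.enumerate_cons]
    simp only [List.foldl_cons]
    have hcast1 : (m : Int) + 1 = ((m + 1 : Nat) : Int) := by omega
    have hfuel : (((m + 1 : Nat) : Int)).toNat = m + 1 := by omega
    rw [hcast1, hfuel, hx]
    have hpis := pullInner_spec r hp (m + 1) hlt (m + 1) 1 dp (by omega) (by omega) hlen
    simp only [Nat.cast_one] at hpis
    rw [hpis]
    set dp1 := dp.set (m + 1) (dp.getD (m + 1) 0 +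
      ((List.range (m + 1 + 1 - 1)).map
        (fun p => if r.getD (m + 1) 0 - r.getD p 0 ≤ 3 then dp.getD p 0 else 0)).sum) with hdp1
    have hdp1v : dp1 = dp.set (m + 1) (gf r (m + 1)) := by
      rw [hdp1]
      congr 1
      rw [hinv (m + 1) hlt, if_neg (by omega)]
      have : m + 1 + 1 - 1 = m + 1 := by omega
      rw [this, zero_add]
      rw [List.map_congr_left (fun p hpmem => by
        have hplt : p < m + 1 := List.mem_range.mp hpmem
        rw [hinv p (by omega), if_pos (show p ≤ m by omega)])]
      rw [gf_eq r (m + 1), if_neg (by omega), zero_add]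
    rw [hdp1v]
    have hlen1 : (dp.set (m + 1) (gf r (m + 1))).length = r.length := by
      simpa using hlen
    have hinv1 : ∀ k, k < r.length →
        (dp.set (m + 1) (gf r (m + 1))).getD k 0 = if k ≤ m + 1 then gf r k else 0 := by
      intro k hk
      by_cases hkm : k = m + 1
      · subst hkm
        rw [getD_set_self dp (m + 1) _ (by omega), if_pos (by omega)]
      · rw [getD_set_ne dp (m + 1) k _ (fun hc => hkm hc.symm), hinv k hk]
        by_cases h1 : k ≤ m
        · rw [if_pos h1, if_pos (by omega)]
        · rw [if_neg h1, if_neg (by omega)]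
    obtain ⟨hL, hP⟩ := ih (m + 1) (dp.set (m + 1) (gf r (m + 1))) (by rw [hxs']) hlen1 hinv1
    refine ⟨hL, fun k hk => ?_⟩
    rw [hP k hk]
    simp only [List.length_cons]
    have : m + 1 + xs'.length = m + (xs'.length + 1) := by omega
    rw [this]
    rfl

-- prefix sums of gf: Sgf r j = dp[0] + … + dp[j-1]
def Sgf (r : List Int) (j : Nat) : Int := ((List.range j).map (gf r)).sum

lemma Sgf_succ (r : List Int) (j : Nat) : Sgf r (j + 1) = Sgf r j + gf r j := by
  simp [Sgf, List.range_succ]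

lemma getD_append_lt (l : List Int) (x : Int) (j : Nat) (h : j < l.length) :
    (l ++ [x]).getD j 0 = l.getD j 0 := by
  rw [List.getD_eq_getElem _ 0 (by simp; omega), List.getD_eq_getElem l 0 h,
    List.getElem_append_left h]

lemma getD_append_len (l : List Int) (x : Int) :
    (l ++ [x]).getD l.length 0 = x := by
  rw [List.getD_eq_getElem _ 0 (by simp)]
  simp

-- B's while loop: starting at lo with every earlier index already out of the window, it returns
-- the first index lo' whose value is within 3 of rk (and lo' never passes k)
lemma findLo_spec (r : List Int) (rk : Int) (k : Nat)
    (hstop : ¬ 3 < rk - r.getD k 0) :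
    ∀ (fuel loN : Nat), loN ≤ k → k - loN ≤ fuel →
    ∃ loN' : Nat, findLo r rk (loN : Int) fuel = (loN' : Int) ∧ loN ≤ loN' ∧ loN' ≤ k ∧
      (∀ i, loN ≤ i → i < loN' → 3 < rk - r.getD i 0) ∧ ¬ 3 < rk - r.getD loN' 0 := by
  intro fuel
  induction fuel with
  | zero =>
    intro loN hle hfuel
    have hk : loN = k := by omega
    subst hk
    exact ⟨loN, rfl, le_refl _, le_refl _, fun i h1 h2 => absurd h2 (by omega), hstop⟩
  | succ fuel ih =>
    intro loN hle hfuel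
    rw [findLo, PySem.List.pyGetD_natCast]
    by_cases hc : 3 < rk - r.getD loN 0
    · have hne : loN ≠ k := fun h => hstop (h ▸ hc)
      have hstep : (loN : Int) + 1 = ((loN + 1 : Nat) : Int) := by omega
      rw [if_pos hc, hstep]
      obtain ⟨loN', h1, h2, h3, h4, h5⟩ := ih (loN + 1) (by omega) (by omega)
      exact ⟨loN', h1, by omega, h3,
        fun i hi1 hi2 => by
          rcases Nat.lt_or_ge i (loN + 1) with h | h
          · have : i = loN := by omega
            exact this ▸ hc
          · exact h4 i h hi2, h5⟩
    · exact ⟨loN, by rw [if_neg hc], le_refl _, hle,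
        fun i h1 h2 => absurd h2 (by omega), hc⟩

-- a 0/ite-sum over range k whose predicate holds exactly from index t on is a difference of sums
lemma sum_ite_suffix (f : Nat → Int) (P : Nat → Prop) [DecidablePred P] (t : Nat) :
    ∀ k, t ≤ k → (∀ p, p < k → (P p ↔ t ≤ p)) →
    ((List.range k).map (fun p => if P p then f p else 0)).sum
      = ((List.range k).map f).sum - ((List.range t).map f).sum := by
  intro k
  induction k with
  | zero =>
    intro hle _
    have : t = 0 := by omega
    subst this
    simp
  | succ k ih =>
    intro hle hiff
    rcases Nat.lt_or_ge t (k + 1) with hlt | hge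
    · have htk : t ≤ k := by omega
      rw [List.range_succ]
      simp only [List.map_append, List.map_cons, List.map_nil, List.sum_append,
        List.sum_cons, List.sum_nil, add_zero]
      rw [ih htk (fun p hp => hiff p (by omega)),
        if_pos ((hiff k (by omega)).2 htk)]
      ring
    · have : t = k + 1 := by omega
      subst this
      have hz : ((List.range (k + 1)).map (fun p => if P p then f p else 0)).sum = 0 := by
        apply List.sum_eq_zero
        intro x hx
        obtain ⟨p, hpmem, rfl⟩ := List.mem_map.mp hx
        have := List.mem_range.mp hpmem
        rw [if_neg (fun h => absurd ((hiff p this).1 h) (by omega))]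
      rw [hz, sub_self]

-- the invariant of B's for loop, pushed through the fold
lemma tp_fold (r : List Int) (hp : WindowClosed r) :
    ∀ (fuel s : Nat) (pre : List Int) (loN : Nat), 1 ≤ s → s ≤ r.length →
    r.length - s ≤ fuel →
    pre.length = s + 1 →
    (∀ j, j ≤ s → pre.getD j 0 = Sgf r j) →
    loN ≤ s - 1 →
    (∀ i, i < loN → 3 < r.getD (s - 1) 0 - r.getD i 0) →
    ((PySem.List.pyRange (s : Int) (PySem.List.len r) 1).foldl (tpStep r)
        (pre, (loN : Int))).1.length = r.length + 1 ∧
    ∀ j, j ≤ r.length →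
      ((PySem.List.pyRange (s : Int) (PySem.List.len r) 1).foldl (tpStep r)
        (pre, (loN : Int))).1.getD j 0 = Sgf r j := by
  intro fuel
  induction fuel with
  | zero =>
    intro s pre loN h1s hsn hfuel hlen hpre hlo hinv
    have hs : s = r.length := by omega
    subst hs
    rw [PySem.List.len_eq, PySem.List.pyRange_one_eq_nil (by omega)]
    exact ⟨by simpa using hlen, fun j hj => by simpa using hpre j hj⟩
  | succ fuel ih =>
    intro s pre loN h1s hsn hfuel hlen hpre hlo hinv
    rcases Nat.lt_or_ge s r.length with hs | hs
    · rw [PySem.List.len_eq, PySem.List.pyRange_one_cons (by exact_mod_cast hs)]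
      simp only [List.foldl_cons]
      -- the invariant on lo transfers from row s-1 to row s via WindowClosed
      have hinv' : ∀ i, i < loN → 3 < r.getD s 0 - r.getD i 0 := by
        intro i hi
        by_contra hc
        push Not at hc
        have h2 := (hp s hs (s - 1) (by omega) i (by omega) hc).2
        have h3 := hinv i hi
        omega
      have hstop : ¬ 3 < r.getD s 0 - r.getD s 0 := by omega
      obtain ⟨loN', hfl, hge, hle, hmid, hok⟩ :=
        findLo_spec r (r.getD s 0) s hstop ((s : Int).toNat + 1) loN (by omega) (by omega)
      have hout : ∀ i, i < loN' → 3 < r.getD s 0 - r.getD i 0 := by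
        intro i hi
        rcases Nat.lt_or_ge i loN with h | h
        · exact hinv' i h
        · exact hmid i h hi
      have hin : ∀ p, p < s → (r.getD s 0 - r.getD p 0 ≤ 3 ↔ loN' ≤ p) := by
        intro p hps
        constructor
        · intro hc
          by_contra hplt
          push Not at hplt
          have := hout p hplt
          omega
        · intro hge'
          rcases Nat.lt_or_ge loN' p with h | h
          · exact (hp s hs p hps loN' h (by omega)).1
          · have hpe : p = loN' := by omega
            subst hpe
            omega
      have hstep : tpStep r (pre, (loN : Int)) (s : Int)
          = (pre ++ [Sgf r (s + 1)], (loN' : Int)) := by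
        simp only [tpStep, hfl, PySem.List.pyGetD_natCast]
        rw [hpre s (le_refl s), hpre loN' (by omega)]
        have hdiff : Sgf r s - Sgf r loN' = gf r s := by
          have hsum := sum_ite_suffix (gf r) (fun p => r.getD s 0 - r.getD p 0 ≤ 3) loN'
            s (by omega) hin
          rw [gf_eq r s, if_neg (show ¬ s = 0 by omega), zero_add, hsum]
          simp [Sgf]
        rw [hdiff, Sgf_succ]
      rw [hstep]
      have hlen' : (pre ++ [Sgf r (s + 1)]).length = (s + 1) + 1 := by
        simp [hlen]
      have hpre' : ∀ j, j ≤ s + 1 → (pre ++ [Sgf r (s + 1)]).getD j 0 = Sgf r j := by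
        intro j hj
        rcases Nat.lt_or_ge j (s + 1) with h | h
        · rw [getD_append_lt pre _ j (by omega), hpre j (by omega)]
        · have hj2 : j = s + 1 := by omega
          have hval := getD_append_len pre (Sgf r (s + 1))
          rw [hlen] at hval
          rw [hj2]
          exact hval
      have hcast : (s : Int) + 1 = ((s + 1 : Nat) : Int) := by omega
      rw [hcast]
      exact ih (s + 1) (pre ++ [Sgf r (s + 1)]) loN' (by omega) (by omega) (by omega)
        hlen' hpre' (by omega) (by simpa using hout)
    · rw [PySem.List.len_eq, PySem.List.pyRange_one_eq_nil (by exact_mod_cast hs)]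
      have hse : s = r.length := by omega
      subst hse
      exact ⟨by simpa using hlen, fun j hj => by simpa using hpre j hj⟩

lemma dp0_spec (r : List Int) (hne : r ≠ []) :
    (PySem.List.pySetD (List.replicate r.length (0 : Int)) 0 1).length = r.length ∧
    ∀ k, k < r.length →
      (PySem.List.pySetD (List.replicate r.length (0 : Int)) 0 1).getD k 0
        = if k = 0 then 1 else 0 := by
  have hpos : 0 < r.length := List.length_pos_iff.mpr hne
  have h0 : PySem.List.pySetD (List.replicate r.length (0 : Int)) 0 1
      = (List.replicate r.length (0 : Int)).set 0 1 := by
    rw [PySem.List.pySetD_of_nonneg (h := by norm_num)]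
    norm_num
  rw [h0]
  refine ⟨by simp, fun k hk => ?_⟩
  by_cases hk0 : k = 0
  · subst hk0
    rw [getD_set_self _ 0 _ (by simpa using hpos), if_pos rfl]
  · rw [getD_set_ne _ 0 k _ (fun hc => hk0 hc.symm), if_neg hk0]
    exact List.getD_replicate _ hk

lemma last_getD (l : List Int) (n : Nat) (hl : l.length = n) (hn : 0 < n) :
    PySem.List.pyGetD l (-1) 0 = l.getD (n - 1) 0 := by
  have hne : l ≠ [] := by
    intro hc; rw [hc] at hl; simp at hl; omega
  rw [PySem.List.pyGetD_neg_one _ _ hne, List.getLast_eq_getElem hne,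
    List.getD_eq_getElem l 0 (by omega)]
  congr 1
  omega

lemma portA_eq_gf (r : List Int) (hne : r ≠ []) (hp : WindowClosed r) :
    count_possible_chains r = gf r (r.length - 1) := by
  have hpos : 0 < r.length := List.length_pos_iff.mpr hne
  obtain ⟨hL0, hinv0⟩ := dp0_spec r hne
  simp only [count_possible_chains]
  rw [PySem.List.slice_from_one, ← List.drop_one]
  have hdrop : r.drop 1 = r.drop (0 + 1) := by norm_num
  rw [hdrop]
  obtain ⟨hL, hP⟩ := pull_fold r hp (r.drop (0 + 1)) 0
    (PySem.List.pySetD (List.replicate r.length (0 : Int)) 0 1) rfl hL0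
    (fun k hk => by
      rw [hinv0 k hk]
      by_cases hk0 : k = 0
      · subst hk0; rw [if_pos rfl, if_pos (le_refl 0), gf_zero]
      · rw [if_neg hk0, if_neg (by omega)])
  simp only [Nat.cast_zero] at hL hP
  rw [last_getD _ r.length hL hpos, hP (r.length - 1) (by omega),
    if_pos (by simp only [List.length_drop, Nat.zero_add]; omega)]

lemma portB_eq_gf (r : List Int) (hne : r ≠ []) (hp : WindowClosed r) :
    count_possible_chains_alt r = gf r (r.length - 1) := by
  have hpos : 0 < r.length := List.length_pos_iff.mpr hne
  simp only [count_possible_chains_alt]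
  rcases Nat.lt_or_ge r.length 2 with h1 | h2
  · -- single-element list: the for loop body never runs
    have hn1 : r.length = 1 := by omega
    rw [PySem.List.len_eq, hn1]
    rw [show ((1 : Nat) : Int) = (1 : Int) by norm_num] at *
    rw [PySem.List.pyRange_one_eq_nil (by norm_num)]
    simp only [List.foldl_nil]
    norm_num [PySem.List.pyGetD, PySem.List.pyGet?, PySem.List.pyIdx?, gf_zero]
  · -- general case: run the fold invariant from s = 1
    have hpre1 : ∀ j, j ≤ 1 → ([0, 1] : List Int).getD j 0 = Sgf r j := by
      intro j hj
      interval_cases j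
      · simp [Sgf]
      · simp [Sgf, List.range_succ, gf_zero]
    have hcast1 : ((1 : Nat) : Int) = (1 : Int) := by norm_num
    obtain ⟨hL, hP⟩ := tp_fold r hp r.length 1 [0, 1] 0 (le_refl 1) (by omega)
      (by omega) (by norm_num) hpre1 (by omega) (fun i hi => absurd hi (by omega))
    rw [hcast1] at hL hP
    rw [show ((0 : Nat) : Int) = (0 : Int) by norm_num] at hL hP
    rw [last_getD _ (r.length + 1) hL (by omega)]
    rw [PySem.List.pyGetD_neg_ofNat _ 2 0 (by omega) (by omega)]
    have h2e : (((PySem.List.pyRange 1 (PySem.List.len r) 1).foldl (tpStep r)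
        ([0, 1], 0)).1)[((PySem.List.pyRange 1 (PySem.List.len r) 1).foldl (tpStep r)
        ([0, 1], 0)).1.length - 2]
        = (((PySem.List.pyRange 1 (PySem.List.len r) 1).foldl (tpStep r)
        ([0, 1], 0)).1).getD (r.length - 1) 0 := by
      rw [List.getD_eq_getElem _ 0 (by omega)]
      congr 1
      omega
    rw [h2e]
    have hs1 : r.length + 1 - 1 = r.length := by omega
    rw [hs1, hP r.length (le_refl _), hP (r.length - 1) (by omega)]
    have hsucc : Sgf r r.length = Sgf r (r.length - 1) + gf r (r.length - 1) := by
      have h := Sgf_succ r (r.length - 1)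
      rwa [show r.length - 1 + 1 = r.length by omega] at h
    rw [hsucc]
    ring

-- ===== VERDICT (by name: the statement is the Claim_ definition above) =====
theorem count_possible_chains_spec : Claim_equal_count_possible_chains := by
  intro r _ hpre
  obtain ⟨hne, hp⟩ := hpre
  unfold Spec_count_possible_chains
  rw [portA_eq_gf r hne hp, portB_eq_gf r hne hp]
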